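-- pv_equiv track=rewrite | github.com/jordanhubbard/Theseus | cleanroom/python/theseus_struct_cr3/__init__.py | calcsize
-- ===== SOURCE A (Python) =====
-- _FMT_SIZES = {
--     'x': 1,  # pad byte
--     'c': 1,  # char
--     'b': 1,  # signed byte
--     'B': 1,  # unsigned byte
--     '?': 1,  # bool
--     'h': 2,  # signed short
--     'H': 2,  # unsigned short
--     'i': 4,  # signed int
--     'I': 4,  # unsigned int
--     'l': 4,  # signed long
--     'L': 4,  # unsigned long
--     'q': 8,  # signed long long
--     'Q': 8,  # unsigned long long
--     'f': 4,  # float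
--     'd': 8,  # double
--     's': 1,  # char[] (count is number of bytes)
--     'p': 1,  # pascal string (count includes length byte)
-- }
--
-- _BYTE_ORDER_CHARS = '<>=!'
--
-- def _parse_fmt(fmt):
--     """
--     Parse a format string into (byte_order, [(count, char), ...]).
--     Returns byte_order as one of '<', '>', '=', '!' (default '=').
--     Each item is (count, fmt_char).
--     """
--     if not fmt:
--         return '=', []
--
--     idx = 0
--     if fmt[0] in _BYTE_ORDER_CHARS:
--         byte_order = fmt[0]
--         idx = 1
--     else:
--         byte_order = '='
--
--     items = []
--     n = len(fmt)
--     while idx < n: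
--         # Collect digits for count
--         count_str = ''
--         while idx < n and fmt[idx].isdigit():
--             count_str += fmt[idx]
--             idx += 1
--         if idx >= n:
--             break
--         ch = fmt[idx]
--         idx += 1
--         count = int(count_str) if count_str else 1
--         if ch not in _FMT_SIZES:
--             raise ValueError(f"Unknown format character: {ch!r}")
--         items.append((count, ch))
--
--     return byte_order, items
--
-- def calcsize(fmt):
--     """Return the number of bytes required by the format string."""
--     _, items = _parse_fmt(fmt)
--     total = 0
--     for count, ch in items:
--         if ch == 's':
--             # count bytes total for the string
--             total += count
--         elif ch == 'p':
--             # pascal string: count bytes total (first byte is length)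
--             total += count
--         else:
--             total += _FMT_SIZES[ch] * count
--     return total
-- ===== SOURCE B (Python) =====
-- _FMT_SIZES = {
--     'x': 1, 'c': 1, 'b': 1, 'B': 1, '?': 1,
--     'h': 2, 'H': 2, 'i': 4, 'I': 4, 'l': 4, 'L': 4,
--     'q': 8, 'Q': 8, 'f': 4, 'd': 8, 's': 1, 'p': 1,
-- }
--
-- def calcsize(fmt):
--     """Return the number of bytes required by the format string."""
--     s = fmt[1:] if fmt[:1] in ('<', '>', '=', '!') else fmt
--     total = 0
--     count = None  # pending repeat count being accumulated digit by digit
--     for ch in s: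
--         if ch.isdigit():
--             count = (count or 0) * 10 + int(ch)
--         else:
--             size = _FMT_SIZES.get(ch)
--             if size is None:
--                 raise ValueError(f"Unknown format character: {ch!r}")
--             total += size * (1 if count is None else count)
--             count = None
--     return total
-- ===== Notes on version B (the rewrite author's own statement) =====
-- stated objective: simpler
-- what changed: Single left-to-right fold over the characters carrying (running total, pending count) instead of A's two-phase index while-loop that builds an intermediate (count, char) item list and then sums it in a second loop with redundant s/p branches.
import Mathlib
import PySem

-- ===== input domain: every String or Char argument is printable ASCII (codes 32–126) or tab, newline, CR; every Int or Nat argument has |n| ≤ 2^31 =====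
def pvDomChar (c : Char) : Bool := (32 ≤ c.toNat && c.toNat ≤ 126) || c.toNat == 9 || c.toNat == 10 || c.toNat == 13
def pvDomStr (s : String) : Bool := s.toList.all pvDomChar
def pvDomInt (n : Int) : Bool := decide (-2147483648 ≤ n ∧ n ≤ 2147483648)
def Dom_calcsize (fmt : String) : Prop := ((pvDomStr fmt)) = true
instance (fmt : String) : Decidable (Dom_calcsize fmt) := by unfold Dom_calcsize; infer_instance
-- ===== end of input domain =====

-- B replaces A's two-phase parse-then-sum (index while-loop building an item list, then a
-- second summing loop with redundant s/p branches) by a single character fold carrying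
-- (running total, pending count); simpler, same cost.

-- Shared static table _FMT_SIZES (a constant dict; lookup ported as a match)
def fmtSize? (c : Char) : Option Int :=
  match c with
  | 'x' => some 1 | 'c' => some 1 | 'b' => some 1 | 'B' => some 1 | '?' => some 1
  | 'h' => some 2 | 'H' => some 2
  | 'i' => some 4 | 'I' => some 4 | 'l' => some 4 | 'L' => some 4
  | 'q' => some 8 | 'Q' => some 8
  | 'f' => some 4 | 'd' => some 8
  | 's' => some 1 | 'p' => some 1
  | _ => none

-- the characters after the optional leading byte-order char (fmt[0] in '<>=!'),
-- identical in A (_parse_fmt's idx = 1) and in B (fmt[1:])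
def restChars (fmt : String) : List Char :=
  match fmt.toList with
  | [] => []
  | c :: rest => if c ∈ ['<', '>', '=', '!'] then rest else c :: rest

-- int(count_str) for a nonempty string of ASCII digits: hand-ported as the usual
-- base-10 fold, exact on that domain (count_str is built from isdigit chars only)
def digitsVal (ds : List Char) : Int :=
  ds.foldl (fun a c => a * 10 + ((c.toNat : Int) - 48)) 0

-- ===== PORT A =====
-- A's while loop: collect digits (inner while = takeWhile/dropWhile), break at end,
-- look up the char, cons the (count, ch) item; none = the ValueError branch
def parseItems : List Char → Option (List (Int × Char))
  | [] => some []
  | c :: cs =>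
    let ds := (c :: cs).takeWhile PySem.Chars.isdigit
    match h : (c :: cs).dropWhile PySem.Chars.isdigit with
    | [] => some []
    | ch :: rest =>
      match fmtSize? ch with
      | none => none
      | some _ =>
        match parseItems rest with
        | none => none
        | some items => some ((if ds = [] then (1 : Int) else digitsVal ds, ch) :: items)
  termination_by l => l.length
  decreasing_by
    have h1 : ((c :: cs).dropWhile PySem.Chars.isdigit).length ≤ (c :: cs).length :=
      List.length_dropWhile_le _ _
    rw [h] at h1; simp at h1 ⊢; omega

def calcsize (fmt : String) : Int :=
  match parseItems (restChars fmt) with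
  | none => 0  -- A raises ValueError here; excluded by Pre_calcsize
  | some items =>
    items.foldl
      (fun total it =>
        if it.2 = 's' then total + it.1
        else if it.2 = 'p' then total + it.1
        else total + (fmtSize? it.2).getD 0 * it.1)
      0

-- ===== PORT B =====
-- one pass: state = (total, pending count); digit extends the pending count,
-- a format char flushes size * (pending or 1)
def bstep (p : Int × Option Int) (c : Char) : Int × Option Int :=
  if PySem.Chars.isdigit c then (p.1, some (p.2.getD 0 * 10 + ((c.toNat : Int) - 48)))
  else
    match fmtSize? c with
    | some sz => (p.1 + sz * p.2.getD 1, none)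
    | none => p  -- B raises ValueError here; excluded by Pre_calcsize

def calcsize_alt (fmt : String) : Int :=
  ((restChars fmt).foldl bstep (0, none)).1

-- ===== PRECONDITION & SPEC =====
-- Pre_ excludes exactly the inputs on which A (and B) raise ValueError: a character
-- after the optional byte-order prefix that is neither a digit nor a known format char
def Pre_calcsize (fmt : String) : Prop :=
  ((restChars fmt).all (fun c => PySem.Chars.isdigit c || (fmtSize? c).isSome)) = true
instance (fmt : String) : Decidable (Pre_calcsize fmt) := by unfold Pre_calcsize; infer_instance

def pvWitness_calcsize : String := "<2h4s3p12q"

def Spec_calcsize (fmt : String) (out : Int) : Prop := out = calcsize_alt fmt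
instance (fmt : String) (out : Int) : Decidable (Spec_calcsize fmt out) := by unfold Spec_calcsize; infer_instance

-- ===== CLAIM (what is proved, stated in full; the proofs are below) =====
def Claim_equal_calcsize : Prop := ∀ (fmt : String), Dom_calcsize fmt → Pre_calcsize fmt → Spec_calcsize fmt (calcsize fmt)

-- ===== LEMMAS AND PROOFS =====

-- the sum A's second loop computes over an item list
def sumItems (items : List (Int × Char)) : Int :=
  items.foldl
    (fun total it =>
      if it.2 = 's' then total + it.1
      else if it.2 = 'p' then total + it.1
      else total + (fmtSize? it.2).getD 0 * it.1)
    0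

theorem sumItems_cons (i : Int × Char) (items : List (Int × Char)) :
    sumItems (i :: items) =
      (if i.2 = 's' then i.1 else if i.2 = 'p' then i.1 else (fmtSize? i.2).getD 0 * i.1)
        + sumItems items := by
  have key : ∀ (l : List (Int × Char)) (t : Int),
      l.foldl (fun total it =>
        if it.2 = 's' then total + it.1
        else if it.2 = 'p' then total + it.1
        else total + (fmtSize? it.2).getD 0 * it.1) t
      = t + l.foldl (fun total it =>
        if it.2 = 's' then total + it.1
        else if it.2 = 'p' then total + it.1
        else total + (fmtSize? it.2).getD 0 * it.1) 0 := by
    intro l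
    induction l with
    | nil => simp
    | cons a l ih =>
      intro t
      simp only [List.foldl_cons]
      rw [ih, ih (if a.2 = 's' then 0 + a.1 else if a.2 = 'p' then 0 + a.1 else 0 + (fmtSize? a.2).getD 0 * a.1)]
      split_ifs <;> ring
  simp only [sumItems, List.foldl_cons]
  rw [key]
  split_ifs <;> ring

-- for a known format char, the s/p special cases coincide with size * count
theorem sumItems_cons_size (cnt : Int) (ch : Char) (sz : Int) (items : List (Int × Char))
    (h : fmtSize? ch = some sz) :
    sumItems ((cnt, ch) :: items) = sz * cnt + sumItems items := by
  rw [sumItems_cons]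
  by_cases hs : ch = 's'
  · subst hs; simp [fmtSize?] at h; subst h; simp
  · by_cases hp : ch = 'p'
    · subst hp; simp [fmtSize?] at h; subst h; simp [hs]
    · simp [hs, hp, h]

-- B's fold through a run of digits: total untouched, pending count accumulated base 10
theorem foldl_bstep_digits (ds : List Char) (hds : ∀ c ∈ ds, PySem.Chars.isdigit c = true) :
    ∀ (t : Int) (p : Option Int),
      ds.foldl bstep (t, p) =
        (t, if ds = [] then p
            else some (ds.foldl (fun a c => a * 10 + ((c.toNat : Int) - 48)) (p.getD 0))) := by
  induction ds with
  | nil => intro t p; simp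
  | cons d ds ih =>
    intro t p
    have hd : PySem.Chars.isdigit d = true := hds d (by simp)
    simp only [List.foldl_cons, bstep, hd, if_pos]
    rw [ih (fun c hc => hds c (by simp [hc]))]
    cases ds with
    | nil => simp
    | cons e es => simp

-- the first char a dropWhile leaves behind fails the predicate
theorem dropWhile_head_false {p : Char → Bool} :
    ∀ (l : List Char) (a : Char) (r : List Char), l.dropWhile p = a :: r → p a = false := by
  intro l
  induction l with
  | nil => intro a r h; simp at h
  | cons x xs ih =>
    intro a r h
    rw [List.dropWhile_cons] at h
    by_cases hx : p x = true
    · rw [if_pos hx] at h; exact ih a r h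
    · rw [if_neg hx] at h
      cases h; simpa using hx

-- main invariant: on a valid tail, B's one-pass fold (with no pending count) computes
-- A's parse-then-sum total added to the running total
theorem key_lemma : ∀ (n : Nat) (cs : List Char), cs.length ≤ n →
    (∀ c ∈ cs, PySem.Chars.isdigit c = true ∨ fmtSize? c ≠ none) →
    ∀ (t : Int), ∃ items, parseItems cs = some items ∧
      (cs.foldl bstep (t, none)).1 = t + sumItems items := by
  intro n
  induction n with
  | zero =>
    intro cs hlen _ t
    have : cs = [] := List.eq_nil_of_length_eq_zero (Nat.le_zero.mp hlen)
    subst this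
    exact ⟨[], by rw [parseItems], by simp [sumItems]⟩
  | succ n ih =>
    intro cs hlen hok t
    match cs with
    | [] => exact ⟨[], by rw [parseItems], by simp [sumItems]⟩
    | c :: cs' =>
      have hsplit : (c :: cs').takeWhile PySem.Chars.isdigit
          ++ (c :: cs').dropWhile PySem.Chars.isdigit = c :: cs' :=
        List.takeWhile_append_dropWhile
      have hdsdig : ∀ x ∈ (c :: cs').takeWhile PySem.Chars.isdigit,
          PySem.Chars.isdigit x = true := fun x hx => List.mem_takeWhile_imp hx
      match hdw : (c :: cs').dropWhile PySem.Chars.isdigit with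
      | [] =>
        refine ⟨[], ?_, ?_⟩
        · rw [parseItems]
          split
          · rfl
          · rename_i ch rest heq
            rw [hdw] at heq; exact absurd heq (by simp)
        · have hall : ∀ x ∈ c :: cs', PySem.Chars.isdigit x = true := by
            have := List.dropWhile_eq_nil_iff.mp hdw
            simpa using this
          rw [foldl_bstep_digits _ hall t none]
          simp [sumItems]
      | ch :: rest =>
        have hnd : PySem.Chars.isdigit ch = false := dropWhile_head_false _ _ _ hdw
        have hchmem : ch ∈ c :: cs' := by
          rw [← hsplit, hdw]; simp
        have hsz : ∃ sz, fmtSize? ch = some sz := by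
          rcases hok ch hchmem with hd | hm
          · rw [hnd] at hd; exact Bool.noConfusion hd
          · exact Option.ne_none_iff_exists'.mp hm
        obtain ⟨sz, hsz⟩ := hsz
        -- tail is strictly shorter
        have hlt : rest.length ≤ n := by
          have h1 : ((c :: cs').dropWhile PySem.Chars.isdigit).length ≤ (c :: cs').length :=
            List.length_dropWhile_le _ _
          rw [hdw] at h1; simp at h1; simp at hlen; omega
        have hokrest : ∀ x ∈ rest, PySem.Chars.isdigit x = true ∨ fmtSize? x ≠ none := by
          intro x hx
          have : x ∈ c :: cs' := by
            rw [← hsplit, hdw]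
            exact List.mem_append_right _ (List.mem_cons_of_mem _ hx)
          exact hok x this
        set ds := (c :: cs').takeWhile PySem.Chars.isdigit with hds
        set cnt : Int := if ds = [] then 1 else digitsVal ds with hcnt
        obtain ⟨items', hp', hsum'⟩ := ih rest hlt hokrest (t + sz * cnt)
        refine ⟨(cnt, ch) :: items', ?_, ?_⟩
        · rw [parseItems]
          split
          · rename_i heq
            rw [hdw] at heq; exact absurd heq (by simp)
          · rename_i ch0 rest0 heq
            rw [hdw] at heq
            injection heq with h1 h2
            subst h1; subst h2
            rw [hsz, hp']
        · -- run B's fold: digits, then ch, then rest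
          conv_lhs => rw [← hsplit, hdw, List.foldl_append]
          rw [foldl_bstep_digits ds hdsdig t none]
          have hstep : bstep (t, if ds = [] then none
              else some (ds.foldl (fun a c => a * 10 + ((c.toNat : Int) - 48)) ((none : Option Int).getD 0))) ch
              = (t + sz * cnt, none) := by
            by_cases hde : ds = []
            · simp [bstep, hnd, hsz, hcnt, hde]
            · simp [bstep, hnd, hsz, hcnt, hde, digitsVal]
          simp only [List.foldl_cons, hstep, hsum']
          rw [sumItems_cons_size cnt ch sz items' hsz]
          ring

-- ===== VERDICT (by name: the statement is the Claim_ definition above) =====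
theorem calcsize_spec : Claim_equal_calcsize := by
  intro fmt _ hpre
  unfold Spec_calcsize calcsize calcsize_alt
  have hok : ∀ c ∈ restChars fmt, PySem.Chars.isdigit c = true ∨ fmtSize? c ≠ none := by
    intro c hc
    have h := List.all_eq_true.mp hpre c hc
    rcases (Bool.or_eq_true _ _).mp h with h1 | h1
    · exact Or.inl h1
    · exact Or.inr (Option.isSome_iff_ne_none.mp h1)
  obtain ⟨items, hp, hsum⟩ := key_lemma (restChars fmt).length (restChars fmt) le_rfl hok 0
  rw [hp, hsum]
  simp [sumItems]
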